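-- pv_equiv track=rewrite | github.com/UoLPythonGroup/training | bits_n_bobs/permutations.py | permutations_internal
-- ===== SOURCE A (Python) =====
-- def permutations_internal(partial_list,
--                           remaining_numbers):
--     """Returns a list of permutations starting from
--     partial_list with all zeros filled in from remaining_numbers"""
--     if len(remaining_numbers) == 1:
--         partial_list = partial_list[:]
--         index = partial_list.index(0)
--         partial_list[index] = remaining_numbers[0]
--         return [partial_list]
--
--     result = []
--     first_number = remaining_numbers[0]
--     for index, number in enumerate(partial_list):
--         if number == 0:
--             new_partial_list = partial_list[:]
--             new_partial_list[index] = first_number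
--             new_remaining_numbers = remaining_numbers[1:]
--             tmp = permutations_internal(new_partial_list,
--                                         new_remaining_numbers)
--             result.extend(tmp)
--     return result
-- ===== SOURCE B (Python) =====
-- def permutations_internal(partial_list,
--                           remaining_numbers):
--     """Returns a list of permutations starting from
--     partial_list with all zeros filled in from remaining_numbers"""
--     states = [partial_list]
--     for r in remaining_numbers[:-1]:
--         next_states = []
--         for s in states:
--             for i, x in enumerate(s):
--                 if x == 0:
--                     new_s = s[:]
--                     new_s[i] = r
--                     next_states.append(new_s)
--         states = next_states
--     last = remaining_numbers[-1]
--     result = []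
--     for s in states:
--         out = s[:]
--         out[out.index(0)] = last
--         result.append(out)
--     return result
-- ===== Notes on version B (the rewrite author's own statement) =====
-- stated objective: alternative
-- what changed: B replaces A's depth-first recursion by an iterative breadth-first worklist: it expands the list of partially-filled states level by level for all but the last number, then fills the first remaining zero of each surviving state; no recursion and no per-call re-slicing of remaining_numbers.
import Mathlib
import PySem

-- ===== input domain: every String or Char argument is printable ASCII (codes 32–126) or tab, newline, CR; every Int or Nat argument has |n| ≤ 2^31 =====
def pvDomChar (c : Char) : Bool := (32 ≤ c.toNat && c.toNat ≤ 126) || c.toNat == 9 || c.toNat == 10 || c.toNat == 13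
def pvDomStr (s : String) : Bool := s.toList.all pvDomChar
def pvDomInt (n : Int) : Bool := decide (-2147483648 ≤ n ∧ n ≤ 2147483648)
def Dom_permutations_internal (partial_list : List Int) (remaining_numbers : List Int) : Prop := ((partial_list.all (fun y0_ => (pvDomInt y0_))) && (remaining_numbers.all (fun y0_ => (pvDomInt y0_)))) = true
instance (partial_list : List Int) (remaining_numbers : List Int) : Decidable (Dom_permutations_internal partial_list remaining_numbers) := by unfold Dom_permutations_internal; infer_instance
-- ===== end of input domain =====

-- B replaces A's depth-first recursion by an iterative breadth-first worklist that expands the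
-- partially-filled states level by level and then fills the first zero of each state (objective: alternative).


-- ===== PORT A =====
def permutations_internal (partial_list : List Int) (remaining_numbers : List Int) : List (List Int) :=
  match remaining_numbers with
  | [] => []          -- Python: remaining_numbers[0] raises IndexError here (excluded by Pre_)
  | [r] =>            -- the `len(remaining_numbers) == 1` branch
    match PySem.List.index? partial_list (0 : Int) with
    | some i => [partial_list.set i r]
    | none => []      -- Python: .index(0) raises ValueError here (excluded by Pre_)
  | r :: rs =>        -- first_number = remaining_numbers[0]; loop over enumerate(partial_list)
    (PySem.List.enumerate partial_list 0).foldl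
      (fun result ix =>
        if ix.2 = 0 then
          result ++ permutations_internal (partial_list.set ix.1.toNat r) rs
        else result) []
termination_by remaining_numbers.length
decreasing_by simp

-- ===== PORT B =====
def permutations_internal_alt (partial_list : List Int) (remaining_numbers : List Int) : List (List Int) :=
  -- states = [partial_list]; for r in remaining_numbers[:-1]: expand every state at every zero
  let states :=
    (PySem.List.slice remaining_numbers none (some (-1))).foldl
      (fun states r =>
        states.foldl
          (fun next_states s =>
            (PySem.List.enumerate s 0).foldl
              (fun next_states ix =>
                if ix.2 = 0 then next_states ++ [s.set ix.1.toNat r] else next_states)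
              next_states)
          [])
      [partial_list]
  -- last = remaining_numbers[-1]; fill the first zero of each state
  match PySem.List.pyGet? remaining_numbers (-1) with
  | none => []        -- Python: remaining_numbers[-1] raises IndexError here (excluded by Pre_)
  | some last =>
    states.foldl
      (fun result s =>
        match PySem.List.index? s (0 : Int) with
        | none => result   -- Python: out.index(0) raises ValueError here (excluded by Pre_)
        | some i => result ++ [s.set i last])
      []

-- ===== PRECONDITION & SPEC =====
-- Pre_ excludes exactly the inputs on which Python A raises: empty remaining_numbers (IndexError),
-- and inputs where the level-by-level filling survives to the last number but leaves no zero slot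
-- for it (ValueError from .index(0)); Python B raises the same exceptions on the same inputs.
def Pre_permutations_internal (partial_list : List Int) (remaining_numbers : List Int) : Prop :=
  remaining_numbers ≠ [] ∧
    ¬ (partial_list.count 0 = (remaining_numbers.dropLast.filter (fun x => !(x == 0))).length ∧
       ∀ j < remaining_numbers.length - 1,
         ((remaining_numbers.take j).filter (fun x => !(x == 0))).length < partial_list.count 0)
instance (partial_list : List Int) (remaining_numbers : List Int) : Decidable (Pre_permutations_internal partial_list remaining_numbers) := by unfold Pre_permutations_internal; infer_instance

def pvWitness_permutations_internal : List Int × List Int := ([0, 5, 0], [1, 2])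

def Spec_permutations_internal (partial_list : List Int) (remaining_numbers : List Int) (out : List (List Int)) : Prop := out = permutations_internal_alt partial_list remaining_numbers
instance (partial_list : List Int) (remaining_numbers : List Int) (out : List (List Int)) : Decidable (Spec_permutations_internal partial_list remaining_numbers out) := by unfold Spec_permutations_internal; infer_instance

-- ===== CLAIM (what is proved, stated in full; the proofs are below) =====
def Claim_equal_permutations_internal : Prop := ∀ (partial_list : List Int) (remaining_numbers : List Int), Dom_permutations_internal partial_list remaining_numbers → Pre_permutations_internal partial_list remaining_numbers → Spec_permutations_internal partial_list remaining_numbers (permutations_internal partial_list remaining_numbers)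

-- ===== LEMMAS AND PROOFS =====

-- the zero positions of a list, as both ports' zero scans produce them
def pvZeros (pl : List Int) : List Nat :=
  (PySem.List.enumerate pl 0).filterMap
    (fun ix => if ix.2 = 0 then some ix.1.toNat else none)

theorem filter_map_guard (l : List (Int × Int)) :
    l.filterMap (fun ix => if ix.2 = 0 then some ix.1.toNat else none) =
      (l.filter (fun ix => decide (ix.2 = 0))).map (fun ix => ix.1.toNat) := by
  induction l with
  | nil => rfl
  | cons a t ih => by_cases ha : a.2 = 0 <;> simp [ha, ih]

theorem pvZeros_as_filter (pl : List Int) :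
    pvZeros pl =
      ((PySem.List.enumerate pl 0).filter (fun ix => decide (ix.2 = 0))).map
        (fun ix => ix.1.toNat) := by
  unfold pvZeros
  exact filter_map_guard _

-- one level of B's breadth-first expansion, and its final filling stage
def pvStep (r : Int) (states : List (List Int)) : List (List Int) :=
  states.flatMap (fun s => (pvZeros s).map (fun z => s.set z r))

def pvFinal (last : Int) (states : List (List Int)) : List (List Int) :=
  states.flatMap (fun s =>
    match PySem.List.index? s (0 : Int) with
    | none => []
    | some i => [s.set i last])

-- B's whole computation, phrased with pvStep/pvFinal
def pvAlt2 (pl : List Int) (rn : List Int) : List (List Int) :=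
  match PySem.List.pyGet? rn (-1) with
  | none => []
  | some last => pvFinal last (rn.dropLast.foldl (fun st r => pvStep r st) [pl])

theorem inner_eq (s : List Int) (r : Int) (acc : List (List Int)) :
    (PySem.List.enumerate s 0).foldl
      (fun next_states ix =>
        if ix.2 = 0 then next_states ++ [s.set ix.1.toNat r] else next_states) acc =
      acc ++ (pvZeros s).map (fun z => s.set z r) := by
  rw [PySem.List.foldl_append_ite, pvZeros_as_filter, List.map_map]
  rfl

theorem step_eq (r : Int) (states : List (List Int)) :
    states.foldl
      (fun next_states s =>
        (PySem.List.enumerate s 0).foldl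
          (fun next_states ix =>
            if ix.2 = 0 then next_states ++ [s.set ix.1.toNat r] else next_states)
          next_states) [] = pvStep r states := by
  have hfun : (fun (next_states : List (List Int)) (s : List Int) =>
      (PySem.List.enumerate s 0).foldl
        (fun next_states ix =>
          if ix.2 = 0 then next_states ++ [s.set ix.1.toNat r] else next_states)
        next_states) =
      fun next_states s => next_states ++ (pvZeros s).map (fun z => s.set z r) := by
    funext next_states s
    exact inner_eq s r next_states
  rw [hfun, PySem.List.foldl_append_eq_flatMap]
  rfl

theorem final_eq (last : Int) (states : List (List Int)) (acc : List (List Int)) :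
    states.foldl
      (fun result s =>
        match PySem.List.index? s (0 : Int) with
        | none => result
        | some i => result ++ [s.set i last]) acc = acc ++ pvFinal last states := by
  induction states generalizing acc with
  | nil => simp [pvFinal]
  | cons s t ih =>
    rw [List.foldl_cons]
    cases h : PySem.List.index? s (0 : Int) with
    | none => simp only [h, ih, pvFinal, List.flatMap_cons, List.nil_append]
    | some i => simp only [h, ih, pvFinal, List.flatMap_cons, List.append_assoc,
        List.singleton_append]

theorem alt_eq2 (pl : List Int) (rn : List Int) :
    permutations_internal_alt pl rn = pvAlt2 pl rn := by
  have hbody : (fun (states : List (List Int)) (r : Int) =>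
      states.foldl
        (fun next_states s =>
          (PySem.List.enumerate s 0).foldl
            (fun next_states ix =>
              if ix.2 = 0 then next_states ++ [s.set ix.1.toNat r] else next_states)
            next_states) []) = fun states r => pvStep r states := by
    funext states r
    exact step_eq r states
  simp only [permutations_internal_alt, pvAlt2, PySem.List.slice_to_neg_one, hbody]
  cases h : PySem.List.pyGet? rn (-1) with
  | none => rfl
  | some last => simpa using final_eq last _ []

theorem pvStep_flatMap {α : Type} (r : Int) (l : List α) (f : α → List (List Int)) :
    pvStep r (l.flatMap f) = l.flatMap (fun x => pvStep r (f x)) := by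
  simp only [pvStep, List.flatMap_assoc]

theorem pvFinal_flatMap {α : Type} (last : Int) (l : List α) (f : α → List (List Int)) :
    pvFinal last (l.flatMap f) = l.flatMap (fun x => pvFinal last (f x)) := by
  simp only [pvFinal, List.flatMap_assoc]

theorem fold_flatMap {α : Type} (L : List Int) :
    ∀ (l : List α) (f : α → List (List Int)),
      L.foldl (fun st r => pvStep r st) (l.flatMap f) =
        l.flatMap (fun x => L.foldl (fun st r => pvStep r st) (f x)) := by
  induction L with
  | nil => intro l f; rfl
  | cons r L ih =>
    intro l f
    rw [List.foldl_cons, pvStep_flatMap, ih l (fun x => pvStep r (f x))]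
    rfl

theorem A_cons (pl : List Int) (r : Int) (rn' : List Int) (h : rn' ≠ []) :
    permutations_internal pl (r :: rn') =
      (pvZeros pl).flatMap (fun z => permutations_internal (pl.set z r) rn') := by
  obtain ⟨y, ys, rfl⟩ : ∃ y ys, rn' = y :: ys := by
    cases rn' with
    | nil => exact absurd rfl h
    | cons y ys => exact ⟨y, ys, rfl⟩
  rw [permutations_internal.eq_def]
  dsimp only
  rw [PySem.List.foldl_ite_eq_foldl_filter, PySem.List.foldl_append_eq_flatMap]
  rw [pvZeros_as_filter, List.flatMap_map]
  simp

theorem alt_cons (pl : List Int) (r : Int) (rn' : List Int) (h : rn' ≠ []) :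
    permutations_internal_alt pl (r :: rn') =
      (pvZeros pl).flatMap (fun z => permutations_internal_alt (pl.set z r) rn') := by
  obtain ⟨y, ys, rfl⟩ : ∃ y ys, rn' = y :: ys := by
    cases rn' with
    | nil => exact absurd rfl h
    | cons y ys => exact ⟨y, ys, rfl⟩
  rw [alt_eq2]
  have hfuneq : ∀ z : Nat, permutations_internal_alt (pl.set z r) (y :: ys) =
      pvAlt2 (pl.set z r) (y :: ys) := fun z => alt_eq2 _ _
  simp only [hfuneq, pvAlt2]
  rw [PySem.List.pyGet?_neg_one, PySem.List.pyGet?_neg_one, List.getLast?_cons_cons]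
  cases hlast : (y :: ys).getLast? with
  | none => simp at hlast
  | some last =>
    dsimp only
    have hdrop : (r :: y :: ys).dropLast = r :: (y :: ys).dropLast := rfl
    rw [hdrop, List.foldl_cons]
    have hseed : pvStep r [pl] = (pvZeros pl).flatMap (fun z => [pl.set z r]) := by
      simp [pvStep, List.map_eq_flatMap]
    rw [hseed, fold_flatMap, pvFinal_flatMap]

theorem base_case (pl : List Int) (r : Int) :
    permutations_internal pl [r] = permutations_internal_alt pl [r] := by
  rw [alt_eq2, permutations_internal.eq_def]
  dsimp only
  have h1 : PySem.List.pyGet? [r] (-1) = some r := by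
    rw [PySem.List.pyGet?_neg_one]; rfl
  have h2 : ([r] : List Int).dropLast = [] := rfl
  simp only [pvAlt2, h1, h2, List.foldl_nil, pvFinal, List.flatMap_cons, List.flatMap_nil]
  cases h : PySem.List.index? pl (0 : Int) <;>
    rw [PySem.List.index?_eq_idxOf?] at h <;> simp [h]

theorem main_equiv : ∀ (rn : List Int) (pl : List Int),
    permutations_internal pl rn = permutations_internal_alt pl rn := by
  intro rn
  induction rn with
  | nil =>
    intro pl
    rw [alt_eq2, permutations_internal.eq_def]
    simp [pvAlt2, PySem.List.pyGet?_neg_one]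
  | cons r rs ih =>
    intro pl
    cases rs with
    | nil => exact base_case pl r
    | cons y ys =>
      rw [A_cons pl r (y :: ys) (by simp), alt_cons pl r (y :: ys) (by simp)]
      congr 1
      funext z
      exact ih (pl.set z r)

-- ===== VERDICT (by name: the statement is the Claim_ definition above) =====
theorem permutations_internal_spec : Claim_equal_permutations_internal := by
  intro pl rn _hdom _hpre
  unfold Spec_permutations_internal
  exact main_equiv rn pl
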